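-- pv_equiv track=rewrite | github.com/Forns/hi-mabuc-aaai19 | src/hi_rct_utl.py | get_iec_clusters
-- ===== SOURCE A (Python) =====
-- from collections import defaultdict
--
-- def dfs(adj_list, visited, vertex, result, key):
--     '''
--     Collects IEC Tuples using simple dfs lifted from StackOverflow:
--     https://stackoverflow.com/questions/42036188/merging-tuples-if-they-have-one-common-element
--     Credit to niemmi
--     '''
--     visited.add(vertex)
--     result[key].append(vertex)
--     for neighbor in adj_list[vertex]:
--         if neighbor not in visited:
--             dfs(adj_list, visited, neighbor, result, key)
--
-- def get_iec_clusters (ACTOR_COUNT, iec_pairs):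
--     '''
--     Clusters actors into IECs
--     '''
--     adj_list = defaultdict(list)
--     for x, y in iec_pairs:
--         adj_list[x].append(y)
--         adj_list[y].append(x)
--
--     result = defaultdict(list)
--     visited = set()
--     for vertex in adj_list:
--         if vertex not in visited:
--             dfs(adj_list, visited, vertex, result, vertex)
--
--     result = [set(r) for r in result.values()]
--     # Account for IECs with single actors
--     for i in range(ACTOR_COUNT):
--         found = False
--         for iec in result:
--             if (i in iec):
--                 found = True
--         if (not found):
--             result.append(set([i]))
--
--     return result
-- ===== SOURCE B (Python) =====
-- def get_iec_clusters(ACTOR_COUNT, iec_pairs):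
--     '''
--     Clusters actors into IECs (iterative DFS with an explicit stack; a single
--     visited set replaces the per-actor scan over all components).
--     '''
--     adj = {}
--     for x, y in iec_pairs:
--         adj.setdefault(x, []).append(y)
--         adj.setdefault(y, []).append(x)
--     visited = set()
--     result = []
--     for root in adj:
--         if root not in visited:
--             comp = []
--             stack = [root]
--             while stack:
--                 v = stack.pop()
--                 if v not in visited:
--                     visited.add(v)
--                     comp.append(v)
--                     stack.extend(reversed(adj[v]))
--             result.append(set(comp))
--     result.extend({i} for i in range(ACTOR_COUNT) if i not in visited)
--     return result
-- ===== Notes on version B (the rewrite author's own statement) =====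
-- stated objective: alternative
-- what changed: Replaces the recursive DFS with an explicit-stack iterative DFS (no recursion-depth limit), and replaces the per-actor scan over every component when appending singleton IECs with a single membership test against the visited set.
import Mathlib
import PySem

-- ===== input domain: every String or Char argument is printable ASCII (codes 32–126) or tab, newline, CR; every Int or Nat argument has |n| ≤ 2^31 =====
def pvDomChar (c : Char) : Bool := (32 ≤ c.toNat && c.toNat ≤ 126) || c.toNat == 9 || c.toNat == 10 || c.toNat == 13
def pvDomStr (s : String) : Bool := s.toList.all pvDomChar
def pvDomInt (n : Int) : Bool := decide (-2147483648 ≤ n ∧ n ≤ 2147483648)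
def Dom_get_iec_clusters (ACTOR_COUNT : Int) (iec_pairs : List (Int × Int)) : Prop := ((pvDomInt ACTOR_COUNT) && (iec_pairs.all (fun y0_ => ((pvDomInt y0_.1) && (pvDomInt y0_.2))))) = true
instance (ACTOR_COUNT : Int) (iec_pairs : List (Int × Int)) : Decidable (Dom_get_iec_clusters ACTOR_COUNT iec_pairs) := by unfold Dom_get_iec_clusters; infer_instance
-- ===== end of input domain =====

-- B replaces A's recursive DFS by an explicit-stack iterative DFS and replaces A's
-- per-actor scan over all components (when appending singleton clusters) by a single
-- membership test against the visited set; return values are proved identical.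


-- ===== PORT A =====
-- A's recursive `dfs`; the Nat argument is a fuel bound making the recursion structural
-- (get_iec_clusters passes enough fuel that it is never exhausted on any input).
def dfsA (adj : PySem.Dict Int (List Int)) :
    Nat → PySem.Set Int → PySem.Dict Int (List Int) → Int → Int →
    PySem.Set Int × PySem.Dict Int (List Int)
  | 0, visited, result, _, _ => (visited, result)
  | fuel+1, visited, result, vertex, key =>
    let visited' := PySem.Set.add visited vertex
    let result' := result.insert key (result.getD key [] ++ [vertex])
    (adj.getD vertex []).foldl
      (fun st neighbor =>
        if PySem.Set.contains st.1 neighbor then st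
        else dfsA adj fuel st.1 st.2 neighbor key)
      (visited', result')

def get_iec_clusters (ACTOR_COUNT : Int) (iec_pairs : List (Int × Int)) : List (List Int) :=
  let adj := iec_pairs.foldl
    (fun d p =>
      let d1 := d.insert p.1 (d.getD p.1 [] ++ [p.2])
      d1.insert p.2 (d1.getD p.2 [] ++ [p.1]))
    PySem.Dict.empty
  let st := adj.keys.foldl
    (fun st vertex =>
      if PySem.Set.contains st.1 vertex then st
      else dfsA adj (adj.keys.length + 1) st.1 st.2 vertex vertex)
    ((PySem.Set.empty : PySem.Set Int), (PySem.Dict.empty : PySem.Dict Int (List Int)))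
  let result := st.2.values.map (fun r => (PySem.Set.ofList r : List Int))
  (PySem.List.pyRange 0 ACTOR_COUNT 1).foldl
    (fun result i =>
      let found := result.foldl (fun f iec => if PySem.Set.contains iec i then true else f) false
      if found then result else result ++ [(PySem.Set.ofList [i] : List Int)])
    result

-- ===== PORT B =====
-- B's `while stack:` loop; Python's list-as-stack (pop/extend at the END) is modelled with
-- the list HEAD as the stack top, so `stack.extend(reversed(adj[v]))` is `adj.getD v [] ++ stack`.
-- The Nat argument is a fuel bound making the loop structural (never exhausted as called).
def stackLoopB (adj : PySem.Dict Int (List Int)) :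
    Nat → PySem.Set Int → List Int → List Int → PySem.Set Int × List Int
  | 0, visited, comp, _ => (visited, comp)
  | _+1, visited, comp, [] => (visited, comp)
  | fuel+1, visited, comp, v :: stack =>
    if PySem.Set.contains visited v then stackLoopB adj fuel visited comp stack
    else stackLoopB adj fuel (PySem.Set.add visited v) (comp ++ [v]) (adj.getD v [] ++ stack)

def get_iec_clusters_alt (ACTOR_COUNT : Int) (iec_pairs : List (Int × Int)) : List (List Int) :=
  let adj := iec_pairs.foldl
    (fun d p => (d.modify p.1 [] (· ++ [p.2])).modify p.2 [] (· ++ [p.1]))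
    PySem.Dict.empty
  let fuel := (adj.values.map List.length).sum + 1
  let st := adj.keys.foldl
    (fun st root =>
      if PySem.Set.contains st.1 root then st
      else
        let r := stackLoopB adj fuel st.1 [] [root]
        (r.1, st.2 ++ [(PySem.Set.ofList r.2 : List Int)]))
    ((PySem.Set.empty : PySem.Set Int), ([] : List (List Int)))
  st.2 ++ ((PySem.List.pyRange 0 ACTOR_COUNT 1).filter
      (fun i => !(PySem.Set.contains st.1 i))).map
    (fun i => (PySem.Set.ofList [i] : List Int))

-- ===== PRECONDITION & SPEC =====
def Spec_get_iec_clusters (ACTOR_COUNT : Int) (iec_pairs : List (Int × Int)) (out : List (List Int)) : Prop := out = get_iec_clusters_alt ACTOR_COUNT iec_pairs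
instance (ACTOR_COUNT : Int) (iec_pairs : List (Int × Int)) (out : List (List Int)) : Decidable (Spec_get_iec_clusters ACTOR_COUNT iec_pairs out) := by unfold Spec_get_iec_clusters; infer_instance

-- ===== CLAIM (what is proved, stated in full; the proofs are below) =====
def Claim_equal_get_iec_clusters : Prop := ∀ (ACTOR_COUNT : Int) (iec_pairs : List (Int × Int)), Dom_get_iec_clusters ACTOR_COUNT iec_pairs → Spec_get_iec_clusters ACTOR_COUNT iec_pairs (get_iec_clusters ACTOR_COUNT iec_pairs)

-- ===== LEMMAS AND PROOFS =====

-- `x in visited` after `visited.add v`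
lemma set_contains_add (s : PySem.Set Int) (x y : Int) :
    PySem.Set.contains (PySem.Set.add s x) y = (PySem.Set.contains s y || (y == x)) := by
  by_cases hx : List.contains s x
  · simp only [PySem.Set.add, PySem.Set.contains, hx, if_true]
    by_cases hyx : y = x
    · subst hyx; simp_all
    · simp [hyx]
  · simp only [PySem.Set.add, PySem.Set.contains, hx]
    simp only [List.contains_eq_mem] at *
    by_cases hyx : y = x <;> simp [hyx]

-- number of adjacency keys not yet visited (termination measure for stackRun)
def unvis (adj : PySem.Dict Int (List Int)) (vis : PySem.Set Int) : Nat :=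
  (adj.keys.filter (fun k => !(PySem.Set.contains vis k))).length

lemma length_filter_restrict_lt (l : List Int) (p : Int → Bool) (v : Int)
    (hv : v ∈ l) (hp : p v = true) :
    (l.filter (fun k => p k && !(k == v))).length < (l.filter p).length := by
  have hmono : ∀ a : Int, (fun k => p k && !(k == v)) a = true → p a = true := by
    intro a ha; simp only [Bool.and_eq_true] at ha; exact ha.1
  induction l with
  | nil => cases hv
  | cons h t ih =>
    by_cases hhv : h = v
    · subst hhv
      rw [List.filter_cons_of_neg (by simp), List.filter_cons_of_pos hp]
      have hle := (List.monotone_filter_right t hmono).length_le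
      simp only [List.length_cons]
      omega
    · have hvt : v ∈ t := by
        rcases List.mem_cons.mp hv with h1 | h1
        · exact absurd h1.symm hhv
        · exact h1
      have hne : (h == v) = false := by simp [hhv]
      by_cases hph : p h = true
      · rw [List.filter_cons_of_pos (by simp [hph, hne]), List.filter_cons_of_pos hph]
        simp only [List.length_cons]
        exact Nat.succ_lt_succ (ih hvt)
      · have hph' : p h = false := by simpa using hph
        rw [List.filter_cons_of_neg (by simp [hph']), List.filter_cons_of_neg (by simp [hph'])]
        exact ih hvt

lemma unvis_add_lt (adj : PySem.Dict Int (List Int)) (vis : PySem.Set Int) (v : Int)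
    (hk : adj.contains v = true) (hv : PySem.Set.contains vis v = false) :
    unvis adj (PySem.Set.add vis v) < unvis adj vis := by
  unfold unvis
  have hmem : v ∈ adj.keys := (PySem.Dict.contains_iff_mem_keys adj v).mp hk
  have hpred : (fun k => !(PySem.Set.contains (PySem.Set.add vis v) k))
      = fun k => (!(PySem.Set.contains vis k)) && !(k == v) := by
    funext k; rw [set_contains_add]; simp [Bool.not_or]
  rw [hpred]
  exact length_filter_restrict_lt adj.keys _ v hmem (by simpa using hv)

-- common functional specification of the DFS exploration: processes the stack in order,
-- skipping visited (or key-less) vertices, and returns (final visited, visit order).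
def stackRun (adj : PySem.Dict Int (List Int)) (vis : PySem.Set Int) (stack : List Int) :
    PySem.Set Int × List Int :=
  match stack with
  | [] => (vis, [])
  | v :: rest =>
    if PySem.Set.contains vis v || !(adj.contains v) then stackRun adj vis rest
    else
      let r := stackRun adj (PySem.Set.add vis v) (adj.getD v [] ++ rest)
      (r.1, v :: r.2)
termination_by (unvis adj vis, stack.length)
decreasing_by
  · apply Prod.Lex.right
    simp only [List.length_cons]
    omega
  · apply Prod.Lex.left
    rename_i h
    have h' := Bool.eq_false_iff.mpr h
    have hc : PySem.Set.contains vis v = false := by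
      cases hcv : PySem.Set.contains vis v
      · rfl
      · rw [hcv] at h'; simp at h'
    have hk : adj.contains v = true := by
      cases hkv : adj.contains v
      · rw [hkv] at h'; simp at h'
      · rfl
    exact unvis_add_lt adj vis v hk hc

lemma stackRun_nil (adj : PySem.Dict Int (List Int)) (vis : PySem.Set Int) :
    stackRun adj vis [] = (vis, []) := by
  rw [stackRun]

lemma stackRun_cons_skip (adj : PySem.Dict Int (List Int)) (vis : PySem.Set Int)
    (v : Int) (rest : List Int)
    (h : (PySem.Set.contains vis v || !(adj.contains v)) = true) :
    stackRun adj vis (v :: rest) = stackRun adj vis rest := by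
  rw [stackRun, if_pos h]

lemma stackRun_cons_go (adj : PySem.Dict Int (List Int)) (vis : PySem.Set Int)
    (v : Int) (rest : List Int)
    (h : (PySem.Set.contains vis v || !(adj.contains v)) = false) :
    stackRun adj vis (v :: rest)
      = ((stackRun adj (PySem.Set.add vis v) (adj.getD v [] ++ rest)).1,
         v :: (stackRun adj (PySem.Set.add vis v) (adj.getD v [] ++ rest)).2) := by
  rw [stackRun, if_neg (by rw [h]; exact Bool.false_ne_true)]

lemma stackRun_mono (adj : PySem.Dict Int (List Int)) (vis : PySem.Set Int)
    (stack : List Int) :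
    ∀ x, PySem.Set.contains vis x = true →
      PySem.Set.contains (stackRun adj vis stack).1 x = true := by
  induction vis, stack using stackRun.induct adj with
  | case1 vis =>
    intro x hx; rw [stackRun_nil]; exact hx
  | case2 vis v rest hguard ih =>
    intro x hx
    rw [stackRun_cons_skip adj vis v rest (by simpa using hguard)]
    exact ih x hx
  | case3 vis v rest hguard ih =>
    intro x hx
    rw [stackRun_cons_go adj vis v rest (by simpa using hguard)]
    exact ih x (by rw [set_contains_add, hx]; rfl)

lemma unvis_le_of_imp (adj : PySem.Dict Int (List Int)) (vis vis' : PySem.Set Int)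
    (h : ∀ x, PySem.Set.contains vis x = true → PySem.Set.contains vis' x = true) :
    unvis adj vis' ≤ unvis adj vis := by
  unfold unvis
  refine (List.monotone_filter_right adj.keys ?_).length_le
  intro a ha
  simp only [Bool.not_eq_true'] at ha ⊢
  by_cases hc : PySem.Set.contains vis a = true
  · rw [h a hc] at ha; cases ha
  · simpa using hc

lemma stackRun_unvis_le (adj : PySem.Dict Int (List Int)) (vis : PySem.Set Int)
    (stack : List Int) :
    unvis adj (stackRun adj vis stack).1 ≤ unvis adj vis :=
  unvis_le_of_imp adj vis _ (stackRun_mono adj vis stack)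

lemma stackRun_mem (adj : PySem.Dict Int (List Int)) (vis : PySem.Set Int)
    (stack : List Int) :
    ∀ x, PySem.Set.contains (stackRun adj vis stack).1 x
      = (PySem.Set.contains vis x || (stackRun adj vis stack).2.contains x) := by
  induction vis, stack using stackRun.induct adj with
  | case1 vis =>
    intro x; rw [stackRun_nil]; simp
  | case2 vis v rest hguard ih =>
    intro x
    rw [stackRun_cons_skip adj vis v rest (by simpa using hguard)]
    exact ih x
  | case3 vis v rest hguard ih =>
    intro x
    rw [stackRun_cons_go adj vis v rest (by simpa using hguard)]
    rw [ih x, set_contains_add]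
    simp only [PySem.Set.contains, List.contains_eq_mem, List.mem_cons]
    by_cases h1 : x ∈ vis <;> by_cases h2 : x = v <;>
      by_cases h3 : x ∈ (stackRun adj (PySem.Set.add vis v) (adj.getD v [] ++ rest)).2 <;>
      simp [h1, h2, h3]

lemma stackRun_append (adj : PySem.Dict Int (List Int)) (vis : PySem.Set Int)
    (s1 : List Int) :
    ∀ s2, stackRun adj vis (s1 ++ s2)
      = ((stackRun adj (stackRun adj vis s1).1 s2).1,
         (stackRun adj vis s1).2 ++ (stackRun adj (stackRun adj vis s1).1 s2).2) := by
  induction vis, s1 using stackRun.induct adj with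
  | case1 vis =>
    intro s2
    rw [List.nil_append, stackRun_nil]
    simp
  | case2 vis v rest hguard ih =>
    intro s2
    have hg : (PySem.Set.contains vis v || !(adj.contains v)) = true := by simpa using hguard
    rw [List.cons_append, stackRun_cons_skip adj vis v (rest ++ s2) hg,
      stackRun_cons_skip adj vis v rest hg]
    exact ih s2
  | case3 vis v rest hguard ih =>
    intro s2
    have hg : (PySem.Set.contains vis v || !(adj.contains v)) = false := by simpa using hguard
    rw [List.cons_append, stackRun_cons_go adj vis v (rest ++ s2) hg,
      stackRun_cons_go adj vis v rest hg]
    rw [← List.append_assoc]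
    rw [ih s2]
    simp

-- adjacency closure: every listed neighbour is itself a key
def Closed (adj : PySem.Dict Int (List Int)) : Prop :=
  ∀ k nb, nb ∈ adj.getD k [] → adj.contains nb = true

lemma adjBuild_aux :
    ∀ (ps : List (Int × Int)) (d : PySem.Dict Int (List Int)),
    d.keys.Nodup → Closed d →
    (ps.foldl
      (fun d p => (d.insert p.1 (d.getD p.1 [] ++ [p.2])).insert p.2
        ((d.insert p.1 (d.getD p.1 [] ++ [p.2])).getD p.2 [] ++ [p.1]))
      d).keys.Nodup ∧
    Closed (ps.foldl
      (fun d p => (d.insert p.1 (d.getD p.1 [] ++ [p.2])).insert p.2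
        ((d.insert p.1 (d.getD p.1 [] ++ [p.2])).getD p.2 [] ++ [p.1]))
      d) := by
  intro ps
  induction ps with
  | nil => intro d hnd hcl; exact ⟨hnd, hcl⟩
  | cons p t ih =>
    intro d hnd hcl
    simp only [List.foldl_cons]
    apply ih
    · exact PySem.Dict.nodup_keys_insert _ _ _ (PySem.Dict.nodup_keys_insert _ _ _ hnd)
    · intro k nb hnb
      rw [PySem.Dict.getD_insert] at hnb
      simp only [PySem.Dict.contains_insert]
      by_cases hky : k = p.2
      · simp only [hky, if_true] at hnb
        rcases List.mem_append.mp hnb with h1 | h1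
        · rw [PySem.Dict.getD_insert] at h1
          by_cases hyx : p.2 = p.1
          · simp only [hyx, if_true] at h1
            rcases List.mem_append.mp h1 with h2 | h2
            · have := hcl p.1 nb h2
              simp [this]
            · simp only [List.mem_singleton] at h2
              simp [h2]
          · simp only [hyx, if_false] at h1
            have := hcl p.2 nb h1
            simp [this]
        · simp only [List.mem_singleton] at h1
          simp [h1]
      · simp only [hky, if_false] at hnb
        rw [PySem.Dict.getD_insert] at hnb
        by_cases hkx : k = p.1
        · simp only [hkx, if_true] at hnb
          rcases List.mem_append.mp hnb with h1 | h1
          · have := hcl p.1 nb h1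
            simp [this]
          · simp only [List.mem_singleton] at h1
            simp [h1]
        · simp only [hkx, if_false] at hnb
          have := hcl k nb hnb
          simp [this]

lemma adjBuild_spec (iec_pairs : List (Int × Int)) :
    (iec_pairs.foldl
      (fun d p => (d.insert p.1 (d.getD p.1 [] ++ [p.2])).insert p.2
        ((d.insert p.1 (d.getD p.1 [] ++ [p.2])).getD p.2 [] ++ [p.1]))
      PySem.Dict.empty).keys.Nodup ∧
    Closed (iec_pairs.foldl
      (fun d p => (d.insert p.1 (d.getD p.1 [] ++ [p.2])).insert p.2
        ((d.insert p.1 (d.getD p.1 [] ++ [p.2])).getD p.2 [] ++ [p.1]))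
      PySem.Dict.empty) := by
  apply adjBuild_aux
  · exact PySem.Dict.nodup_keys_empty
  · intro k nb hnb
    rw [PySem.Dict.getD_of_not_contains _ _ (PySem.Dict.contains_empty k)] at hnb
    cases hnb

lemma map_if_eq_self (k : Int) (v : List Int) :
    ∀ (its : List (Int × List Int)), (its.map (·.1)).Nodup → (k, v) ∈ its →
    its.map (fun p => if p.1 == k then (k, v) else p) = its := by
  intro its
  induction its with
  | nil => simp
  | cons p0 t ih =>
    intro hnd hm
    simp only [List.map_cons, List.nodup_cons] at hnd
    rcases List.mem_cons.mp hm with h0 | ht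
    · subst h0
      simp only [List.map_cons, BEq.refl, if_true]
      congr 1
      have hp : ∀ p ∈ t, (fun p => if p.1 == k then (k, v) else p) p = p := by
        intro p hp
        have hne : p.1 ≠ k := by
          intro he
          exact hnd.1 (List.mem_map.mpr ⟨p, hp, he⟩)
        simp [hne]
      rw [List.map_congr_left hp]
      exact List.map_id' t
    · by_cases hp0 : p0.1 = k
      · exfalso
        apply hnd.1
        rw [hp0]
        exact List.mem_map.mpr ⟨(k, v), ht, rfl⟩
      · have hne : (p0.1 == k) = false := by simp [hp0]
        have hid : (if (p0.1 == k) = true then (k, v) else p0) = p0 := by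
          rw [hne]; simp
        rw [List.map_cons, hid, ih hnd.2 ht]

lemma insert_getD_self (d : PySem.Dict Int (List Int)) (k : Int)
    (h : d.contains k = true) (hnd : d.keys.Nodup) :
    d.insert k (d.getD k []) = d := by
  have hk : k ∈ d.keys := (PySem.Dict.contains_iff_mem_keys d k).mp h
  have hk' : k ∈ d.items.map (·.1) := hk
  have hex : ∃ v, (k, v) ∈ d.items := by
    rcases List.mem_map.mp hk' with ⟨p, hp, hpe⟩
    exact ⟨p.2, by rw [← hpe]; simpa using hp⟩
  obtain ⟨v, hv⟩ := hex
  have hg : d.getD k [] = v := PySem.Dict.getD_of_mem_items d hv hnd []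
  apply PySem.Dict.ext
  rw [PySem.Dict.items_insert_of_contains d _ h, hg]
  exact map_if_eq_self k v d.items hnd hv

lemma unvis_pos (adj : PySem.Dict Int (List Int)) (vis : PySem.Set Int) (v : Int)
    (hk : adj.contains v = true) (hv : PySem.Set.contains vis v = false) :
    1 ≤ unvis adj vis := by
  have hmem : v ∈ adj.keys.filter (fun k => !(PySem.Set.contains vis k)) :=
    List.mem_filter.mpr ⟨(PySem.Dict.contains_iff_mem_keys adj v).mp hk, by simpa using hv⟩
  exact List.length_pos_of_mem hmem

lemma unvis_le_len (adj : PySem.Dict Int (List Int)) (vis : PySem.Set Int) :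
    unvis adj vis ≤ adj.keys.length :=
  List.length_filter_le _ _

-- A's dfs fold over a list of pending vertices equals stackRun
lemma dfsFoldAux (adj : PySem.Dict Int (List Int)) (hC : Closed adj) (_hK : adj.keys.Nodup) :
    ∀ n g, n ≤ g → ∀ (vis : PySem.Set Int), unvis adj vis = n →
    ∀ (l : List Int) (res : PySem.Dict Int (List Int)) (key : Int),
    (∀ nb ∈ l, adj.contains nb = true) →
    res.contains key = true → res.keys.Nodup →
    l.foldl (fun st nb => if PySem.Set.contains st.1 nb then st
             else dfsA adj g st.1 st.2 nb key) (vis, res)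
      = ((stackRun adj vis l).1,
         res.insert key (res.getD key [] ++ (stackRun adj vis l).2)) := by
  intro n
  induction n using Nat.strong_induction_on with
  | _ n IH =>
    intro g hng vis hvis l
    induction l with
    | nil =>
      intro res key _ hck hrnd
      rw [stackRun_nil]
      simp only [List.foldl_nil, List.append_nil]
      rw [insert_getD_self res key hck hrnd]
    | cons nb l' ihl =>
      intro res key hl hck hrnd
      simp only [List.foldl_cons]
      by_cases hnb : PySem.Set.contains vis nb = true
      · rw [if_pos hnb, stackRun_cons_skip adj vis nb l' (by rw [hnb]; rfl)]
        exact ihl res key (fun x hx => hl x (List.mem_cons_of_mem _ hx)) hck hrnd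
      · have hnb' : PySem.Set.contains vis nb = false := by simpa using hnb
        have hkey : adj.contains nb = true := hl nb (by simp)
        have h1 : 1 ≤ n := hvis ▸ unvis_pos adj vis nb hkey hnb'
        obtain ⟨g', rfl⟩ : ∃ g', g = g' + 1 := ⟨g - 1, by omega⟩
        rw [if_neg (by rw [hnb']; exact Bool.false_ne_true)]
        have hlt : unvis adj (PySem.Set.add vis nb) < n :=
          hvis ▸ unvis_add_lt adj vis nb hkey hnb'
        have hcall : dfsA adj (g' + 1) vis res nb key
            = ((stackRun adj (PySem.Set.add vis nb) (adj.getD nb [])).1,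
               res.insert key ((res.getD key [] ++ [nb])
                 ++ (stackRun adj (PySem.Set.add vis nb) (adj.getD nb [])).2)) := by
          simp only [dfsA]
          rw [IH (unvis adj (PySem.Set.add vis nb)) hlt g' (by omega)
              (PySem.Set.add vis nb) rfl (adj.getD nb [])
              (res.insert key (res.getD key [] ++ [nb])) key
              (fun x hx => hC nb x hx)
              (PySem.Dict.contains_insert_self res key _)
              (by rw [PySem.Dict.keys_insert_of_contains res _ hck]; exact hrnd)]
          rw [PySem.Dict.getD_insert_self, PySem.Dict.insert_insert_self]
        rw [hcall]
        rw [IH (unvis adj (stackRun adj (PySem.Set.add vis nb) (adj.getD nb [])).1)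
            (Nat.lt_of_le_of_lt (stackRun_unvis_le adj (PySem.Set.add vis nb) (adj.getD nb [])) hlt)
            (g' + 1)
            (Nat.le_of_lt (Nat.lt_of_lt_of_le
              (Nat.lt_of_le_of_lt (stackRun_unvis_le adj (PySem.Set.add vis nb) (adj.getD nb [])) hlt)
              hng))
            (stackRun adj (PySem.Set.add vis nb) (adj.getD nb [])).1 rfl l'
            (res.insert key ((res.getD key [] ++ [nb])
              ++ (stackRun adj (PySem.Set.add vis nb) (adj.getD nb [])).2)) key
            (fun x hx => hl x (List.mem_cons_of_mem _ hx))
            (PySem.Dict.contains_insert_self _ _ _)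
            (by rw [PySem.Dict.keys_insert_of_contains res _ hck]; exact hrnd)]
        rw [stackRun_cons_go adj vis nb l' (by rw [hnb', hkey]; rfl)]
        rw [stackRun_append adj (PySem.Set.add vis nb) (adj.getD nb []) l']
        rw [PySem.Dict.getD_insert_self, PySem.Dict.insert_insert_self]
        simp [List.append_assoc]

-- total degree bound for B's fuel
def degSum (adj : PySem.Dict Int (List Int)) (vis : PySem.Set Int) : Nat :=
  ((adj.keys.filter (fun k => !(PySem.Set.contains vis k))).map
    (fun k => (adj.getD k []).length)).sum

lemma degSum_le_total (adj : PySem.Dict Int (List Int)) (hK : adj.keys.Nodup)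
    (vis : PySem.Set Int) :
    degSum adj vis ≤ (adj.values.map List.length).sum := by
  unfold degSum
  rw [PySem.Dict.values_eq_map_keys adj hK [], List.map_map]
  refine List.Sublist.sum_le_sum ?_ (fun a _ => Nat.zero_le a)
  have := (List.filter_sublist (l := adj.keys)
      (p := fun k => !(PySem.Set.contains vis k))).map
      (fun k => (adj.getD k []).length)
  simpa [Function.comp] using this

lemma sum_filter_mono (t : List Int) (f : Int → Nat) (p q : Int → Bool)
    (h : ∀ a, p a = true → q a = true) :
    ((t.filter p).map f).sum ≤ ((t.filter q).map f).sum :=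
  List.Sublist.sum_le_sum ((List.monotone_filter_right t h).map f)
    (fun a _ => Nat.zero_le a)

lemma sum_filter_restrict (l : List Int) (hnd : l.Nodup) (p : Int → Bool) (v : Int)
    (hv : v ∈ l) (hp : p v = true) (f : Int → Nat) :
    ((l.filter (fun k => p k && !(k == v))).map f).sum + f v
      ≤ ((l.filter p).map f).sum := by
  induction l with
  | nil => cases hv
  | cons h t ih =>
    rw [List.nodup_cons] at hnd
    by_cases hhv : h = v
    · subst hhv
      rw [List.filter_cons_of_neg (by simp), List.filter_cons_of_pos hp]
      simp only [List.map_cons, List.sum_cons]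
      have hmono := sum_filter_mono t f (fun k => p k && !(k == h)) p
        (by intro a ha; simp only [Bool.and_eq_true] at ha; exact ha.1)
      omega
    · have hvt : v ∈ t := by
        rcases List.mem_cons.mp hv with h1 | h1
        · exact absurd h1.symm hhv
        · exact h1
      have hne : (h == v) = false := by simp [hhv]
      by_cases hph : p h = true
      · rw [List.filter_cons_of_pos (by simp [hph, hne]), List.filter_cons_of_pos hph]
        simp only [List.map_cons, List.sum_cons]
        have := ih hnd.2 hvt
        omega
      · have hph' : p h = false := by simpa using hph
        rw [List.filter_cons_of_neg (by simp [hph']), List.filter_cons_of_neg (by simp [hph'])]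
        exact ih hnd.2 hvt

lemma degSum_add (adj : PySem.Dict Int (List Int)) (hK : adj.keys.Nodup)
    (vis : PySem.Set Int) (v : Int)
    (hk : adj.contains v = true) (hv : PySem.Set.contains vis v = false) :
    degSum adj (PySem.Set.add vis v) + (adj.getD v []).length ≤ degSum adj vis := by
  unfold degSum
  have hpred : (fun k => !(PySem.Set.contains (PySem.Set.add vis v) k))
      = fun k => (!(PySem.Set.contains vis k)) && !(k == v) := by
    funext k; rw [set_contains_add]; simp [Bool.not_or]
  rw [hpred]
  exact sum_filter_restrict adj.keys hK _ v
    ((PySem.Dict.contains_iff_mem_keys adj v).mp hk) (by simpa using hv) _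

lemma stackLoopB_spec (adj : PySem.Dict Int (List Int)) (hC : Closed adj)
    (hK : adj.keys.Nodup) :
    ∀ (fuel : Nat) (stack : List Int) (vis : PySem.Set Int) (comp : List Int),
    (∀ v ∈ stack, adj.contains v = true) →
    stack.length + degSum adj vis ≤ fuel →
    stackLoopB adj fuel vis comp stack
      = ((stackRun adj vis stack).1, comp ++ (stackRun adj vis stack).2) := by
  intro fuel
  induction fuel with
  | zero =>
    intro stack vis comp _ hb
    cases stack with
    | nil =>
      rw [stackRun_nil]
      simp [stackLoopB]
    | cons a t =>
      simp only [List.length_cons] at hb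
      omega
  | succ f ihf =>
    intro stack vis comp hs hb
    cases stack with
    | nil =>
      rw [stackRun_nil]
      simp [stackLoopB]
    | cons v rest =>
      simp only [stackLoopB]
      by_cases hv : PySem.Set.contains vis v = true
      · rw [if_pos hv, stackRun_cons_skip adj vis v rest (by rw [hv]; rfl)]
        exact ihf rest vis comp (fun x hx => hs x (List.mem_cons_of_mem _ hx))
          (by simp only [List.length_cons] at hb; omega)
      · have hv' : PySem.Set.contains vis v = false := by simpa using hv
        have hkv : adj.contains v = true := hs v (by simp)
        rw [if_neg (by rw [hv']; exact Bool.false_ne_true)]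
        have hdeg := degSum_add adj hK vis v hkv hv'
        rw [ihf (adj.getD v [] ++ rest) (PySem.Set.add vis v) (comp ++ [v])
            (by
              intro x hx
              rcases List.mem_append.mp hx with h1 | h1
              · exact hC v x h1
              · exact hs x (List.mem_cons_of_mem _ h1))
            (by
              simp only [List.length_append]
              simp only [List.length_cons] at hb
              omega)]
        rw [stackRun_cons_go adj vis v rest (by rw [hv', hkv]; rfl)]
        simp [List.append_assoc]

-- the found-flag fold in A is List.any
lemma foldl_found (l : List (List Int)) (i : Int) :
    ∀ b, l.foldl (fun f iec => if PySem.Set.contains iec i then true else f) b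
      = (b || l.any (fun iec => PySem.Set.contains iec i)) := by
  induction l with
  | nil => intro b; simp
  | cons c t ih =>
    intro b
    simp only [List.foldl_cons, List.any_cons]
    by_cases hc : PySem.Set.contains c i = true
    · rw [if_pos hc, ih true, hc]
      simp
    · have hc' : PySem.Set.contains c i = false := by simpa using hc
      rw [if_neg (by rw [hc']; exact Bool.false_ne_true), ih b, hc']
      simp

-- the two outer folds over the adjacency keys agree
lemma outerFold (adj : PySem.Dict Int (List Int)) (hC : Closed adj) (hK : adj.keys.Nodup) :
    ∀ (roots : List Int) (vis : PySem.Set Int) (res : PySem.Dict Int (List Int))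
      (lst : List (List Int)),
    (∀ r ∈ roots, adj.contains r = true) →
    res.keys.Nodup →
    (∀ k, res.contains k = true → PySem.Set.contains vis k = true) →
    res.values.map (fun c => (PySem.Set.ofList c : List Int)) = lst →
    (roots.foldl (fun st vertex =>
        if PySem.Set.contains st.1 vertex then st
        else dfsA adj (adj.keys.length + 1) st.1 st.2 vertex vertex) (vis, res)).1
      = (roots.foldl (fun st root =>
          if PySem.Set.contains st.1 root then st
          else
            let r := stackLoopB adj ((adj.values.map List.length).sum + 1) st.1 [] [root]
            (r.1, st.2 ++ [(PySem.Set.ofList r.2 : List Int)])) (vis, lst)).1 ∧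
    (roots.foldl (fun st vertex =>
        if PySem.Set.contains st.1 vertex then st
        else dfsA adj (adj.keys.length + 1) st.1 st.2 vertex vertex) (vis, res)).2.values.map
          (fun c => (PySem.Set.ofList c : List Int))
      = (roots.foldl (fun st root =>
          if PySem.Set.contains st.1 root then st
          else
            let r := stackLoopB adj ((adj.values.map List.length).sum + 1) st.1 [] [root]
            (r.1, st.2 ++ [(PySem.Set.ofList r.2 : List Int)])) (vis, lst)).2 := by
  intro roots
  induction roots with
  | nil =>
    intro vis res lst _ _ _ hlst
    exact ⟨rfl, hlst⟩
  | cons r roots' ih =>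
    intro vis res lst hroots hrnd hresvis hlst
    simp only [List.foldl_cons]
    by_cases hr : PySem.Set.contains vis r = true
    · rw [if_pos hr, if_pos hr]
      exact ih vis res lst (fun x hx => hroots x (List.mem_cons_of_mem _ hx)) hrnd hresvis hlst
    · have hr' : PySem.Set.contains vis r = false := by simpa using hr
      have hkr : adj.contains r = true := hroots r (by simp)
      have hrnotres : res.contains r = false := by
        by_cases h : res.contains r = true
        · rw [hresvis r h] at hr'; cases hr'
        · simpa using h
      have hrkeys : r ∉ res.keys := by
        intro hmem
        rw [(PySem.Dict.contains_iff_mem_keys res r).mpr hmem] at hrnotres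
        cases hrnotres
      have hnd' : (res.insert r ((stackRun adj vis [r]).2)).keys.Nodup := by
        rw [PySem.Dict.keys_insert_of_not_contains res _ hrnotres]
        exact List.Nodup.append hrnd (List.nodup_singleton r)
          (by intro x hx1 hx2; simp only [List.mem_singleton] at hx2; subst hx2; exact hrkeys hx1)
      rw [if_neg (by rw [hr']; exact Bool.false_ne_true), if_neg (by rw [hr']; exact Bool.false_ne_true)]
      -- A's dfs call
      have hA : dfsA adj (adj.keys.length + 1) vis res r r
          = ((stackRun adj vis [r]).1, res.insert r ((stackRun adj vis [r]).2)) := by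
        simp only [dfsA]
        rw [PySem.Dict.getD_of_not_contains res [] hrnotres, List.nil_append]
        rw [dfsFoldAux adj hC hK (unvis adj (PySem.Set.add vis r)) adj.keys.length
            (unvis_le_len adj _) (PySem.Set.add vis r) rfl (adj.getD r [])
            (res.insert r [r]) r (fun x hx => hC r x hx)
            (PySem.Dict.contains_insert_self res r _)
            (by
              rw [PySem.Dict.keys_insert_of_not_contains res _ hrnotres]
              exact List.Nodup.append hrnd (List.nodup_singleton r)
                (by intro x hx1 hx2; simp only [List.mem_singleton] at hx2; subst hx2
                    exact hrkeys hx1))]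
        rw [PySem.Dict.getD_insert_self, PySem.Dict.insert_insert_self]
        rw [stackRun_cons_go adj vis r [] (by rw [hr', hkr]; rfl), List.append_nil]
        simp
      -- B's stack loop call
      have hB : stackLoopB adj ((adj.values.map List.length).sum + 1) vis [] [r]
          = ((stackRun adj vis [r]).1, (stackRun adj vis [r]).2) := by
        rw [stackLoopB_spec adj hC hK _ [r] vis []
            (by intro x hx; simp only [List.mem_singleton] at hx; subst hx; exact hkr)
            (by
              have := degSum_le_total adj hK vis
              simp only [List.length_cons, List.length_nil]
              omega)]
        simp
      rw [hA, hB]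
      have hcr : ((stackRun adj vis [r]).2).contains r = true := by
        rw [stackRun_cons_go adj vis r [] (by rw [hr', hkr]; rfl)]
        simp
      have hvals : (res.insert r ((stackRun adj vis [r]).2)).values.map
            (fun c => (PySem.Set.ofList c : List Int))
          = lst ++ [(PySem.Set.ofList ((stackRun adj vis [r]).2) : List Int)] := by
        have hv2 : (res.insert r ((stackRun adj vis [r]).2)).values
            = res.values ++ [(stackRun adj vis [r]).2] := by
          simp only [PySem.Dict.values, PySem.Dict.items_insert_of_not_contains res _ hrnotres,
            List.map_append, List.map_cons, List.map_nil]
        rw [hv2, List.map_append, hlst]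
        simp
      exact ih (stackRun adj vis [r]).1 (res.insert r ((stackRun adj vis [r]).2))
        (lst ++ [(PySem.Set.ofList ((stackRun adj vis [r]).2) : List Int)])
        (fun x hx => hroots x (List.mem_cons_of_mem _ hx))
        hnd'
        (by
          intro k hk
          rw [stackRun_mem adj vis [r] k]
          rw [PySem.Dict.contains_insert] at hk
          simp only [Bool.or_eq_true, beq_iff_eq] at hk
          rcases hk with h1 | h1
          · subst h1; rw [hcr]; simp
          · rw [hresvis k h1]; rfl)
        hvals

-- final visited set = membership in some collected component (B's outer fold invariant)
lemma bFoldMem (adj : PySem.Dict Int (List Int)) (hC : Closed adj) (hK : adj.keys.Nodup) :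
    ∀ (roots : List Int) (vis : PySem.Set Int) (lst : List (List Int)),
    (∀ r ∈ roots, adj.contains r = true) →
    (∀ x, PySem.Set.contains vis x = lst.any (fun c => PySem.Set.contains c x)) →
    ∀ x, PySem.Set.contains
        (roots.foldl (fun st root =>
          if PySem.Set.contains st.1 root then st
          else
            let r := stackLoopB adj ((adj.values.map List.length).sum + 1) st.1 [] [root]
            (r.1, st.2 ++ [(PySem.Set.ofList r.2 : List Int)])) (vis, lst)).1 x
      = (roots.foldl (fun st root =>
          if PySem.Set.contains st.1 root then st
          else
            let r := stackLoopB adj ((adj.values.map List.length).sum + 1) st.1 [] [root]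
            (r.1, st.2 ++ [(PySem.Set.ofList r.2 : List Int)])) (vis, lst)).2.any
          (fun c => PySem.Set.contains c x) := by
  intro roots
  induction roots with
  | nil => intro vis lst _ hinv x; exact hinv x
  | cons r roots' ih =>
    intro vis lst hroots hinv
    simp only [List.foldl_cons]
    by_cases hr : PySem.Set.contains vis r = true
    · rw [if_pos hr]
      exact ih vis lst (fun x hx => hroots x (List.mem_cons_of_mem _ hx)) hinv
    · have hr' : PySem.Set.contains vis r = false := by simpa using hr
      have hkr : adj.contains r = true := hroots r (by simp)
      rw [if_neg (by rw [hr']; exact Bool.false_ne_true)]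
      have hB : stackLoopB adj ((adj.values.map List.length).sum + 1) vis [] [r]
          = ((stackRun adj vis [r]).1, (stackRun adj vis [r]).2) := by
        rw [stackLoopB_spec adj hC hK _ [r] vis []
            (by intro x hx; simp only [List.mem_singleton] at hx; subst hx; exact hkr)
            (by
              have := degSum_le_total adj hK vis
              simp only [List.length_cons, List.length_nil]
              omega)]
        simp
      rw [hB]
      apply ih _ _ (fun x hx => hroots x (List.mem_cons_of_mem _ hx))
      intro y
      rw [stackRun_mem adj vis [r] y, hinv y]
      simp only [List.any_append, List.any_cons, List.any_nil, Bool.or_false]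
      congr 1
      simp [PySem.Set.contains, List.contains_eq_mem, PySem.Set.mem_ofList]

-- A's singleton-appending fold, once `found` is `any`, appends exactly the unfound elements
lemma singlesAux :
    ∀ (is_ : List Int) (base extra : List (List Int)),
    is_.Nodup →
    (∀ c ∈ extra, ∀ i ∈ is_, PySem.Set.contains c i = false) →
    is_.foldl (fun result i =>
        if result.any (fun iec => PySem.Set.contains iec i) then result
        else result ++ [(PySem.Set.ofList [i] : List Int)])
      (base ++ extra)
      = (base ++ extra)
        ++ (is_.filter (fun i => !(base.any (fun iec => PySem.Set.contains iec i)))).map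
            (fun i => (PySem.Set.ofList [i] : List Int)) := by
  intro is_
  induction is_ with
  | nil => intro base extra _ _; simp
  | cons i t ih =>
    intro base extra hnd hextra
    rw [List.nodup_cons] at hnd
    simp only [List.foldl_cons, List.filter_cons]
    have hany : (base ++ extra).any (fun iec => PySem.Set.contains iec i)
        = base.any (fun iec => PySem.Set.contains iec i) := by
      rw [List.any_append]
      have hex : extra.any (fun iec => PySem.Set.contains iec i) = false := by
        rw [List.any_eq_false]
        intro c hc
        simpa using hextra c hc i (by simp)
      rw [hex, Bool.or_false]
    by_cases hf : base.any (fun iec => PySem.Set.contains iec i) = true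
    · rw [if_pos (by rw [hany]; exact hf)]
      rw [ih base extra hnd.2 (fun c hc j hj => hextra c hc j (List.mem_cons_of_mem _ hj))]
      rw [hf]
      simp
    · have hf' : base.any (fun iec => PySem.Set.contains iec i) = false := by simpa using hf
      rw [if_neg (by rw [hany, hf']; simp)]
      have hstep : (base ++ extra) ++ [(PySem.Set.ofList [i] : List Int)]
          = base ++ (extra ++ [(PySem.Set.ofList [i] : List Int)]) := by
        simp [List.append_assoc]
      rw [hstep]
      rw [ih base (extra ++ [(PySem.Set.ofList [i] : List Int)]) hnd.2 ?hext]
      case hext =>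
        intro c hc j hj
        rcases List.mem_append.mp hc with h1 | h1
        · exact hextra c h1 j (List.mem_cons_of_mem _ hj)
        · simp only [List.mem_singleton] at h1
          subst h1
          have hne : j ≠ i := fun he => hnd.1 (he ▸ hj)
          simp [PySem.Set.contains, List.contains_eq_mem, PySem.Set.mem_ofList, hne]
      rw [hf']
      simp [List.append_assoc]

lemma singles (is_ : List Int) (base : List (List Int)) (hnd : is_.Nodup) :
    is_.foldl (fun result i =>
        if result.any (fun iec => PySem.Set.contains iec i) then result
        else result ++ [(PySem.Set.ofList [i] : List Int)])
      base
      = base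
        ++ (is_.filter (fun i => !(base.any (fun iec => PySem.Set.contains iec i)))).map
            (fun i => (PySem.Set.ofList [i] : List Int)) := by
  have := singlesAux is_ base [] hnd (by intro c hc; cases hc)
  simpa using this

-- ===== VERDICT (by name: the statement is the Claim_ definition above) =====
theorem get_iec_clusters_spec : Claim_equal_get_iec_clusters := by
  unfold Claim_equal_get_iec_clusters
  intro AC pairs _
  unfold Spec_get_iec_clusters
  have hadj : (pairs.foldl
      (fun d p => (d.modify p.1 [] (· ++ [p.2])).modify p.2 [] (· ++ [p.1]))
      PySem.Dict.empty)
      = pairs.foldl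
        (fun d p => (d.insert p.1 (d.getD p.1 [] ++ [p.2])).insert p.2
          ((d.insert p.1 (d.getD p.1 [] ++ [p.2])).getD p.2 [] ++ [p.1]))
        PySem.Dict.empty := rfl
  simp only [get_iec_clusters, get_iec_clusters_alt]
  rw [hadj]
  obtain ⟨hK, hC⟩ := adjBuild_spec pairs
  set adj := pairs.foldl
      (fun d p => (d.insert p.1 (d.getD p.1 [] ++ [p.2])).insert p.2
        ((d.insert p.1 (d.getD p.1 [] ++ [p.2])).getD p.2 [] ++ [p.1]))
      PySem.Dict.empty with hadjdef
  have hroots : ∀ r ∈ adj.keys, adj.contains r = true :=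
    fun r hr => (PySem.Dict.contains_iff_mem_keys adj r).mpr hr
  obtain ⟨h1, h2⟩ := outerFold adj hC hK adj.keys PySem.Set.empty PySem.Dict.empty []
    hroots PySem.Dict.nodup_keys_empty
    (fun k hk => by rw [PySem.Dict.contains_empty] at hk; cases hk)
    (by simp [PySem.Dict.values, PySem.Dict.empty])
  have hmem := bFoldMem adj hC hK adj.keys PySem.Set.empty [] hroots
    (fun x => by simp [PySem.Set.contains, PySem.Set.empty])
  simp only [foldl_found, Bool.false_or]
  rw [singles _ _ (PySem.List.nodup_pyRange_one 0 AC)]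
  rw [h2]
  congr 1
  congr 1
  apply List.filter_congr
  intro i _
  rw [hmem i]
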